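-- pv_equiv track=rewrite | github.com/df7cb/aoc | 2015/11.py | check
-- ===== SOURCE A (Python) =====
-- def check(t):
--     for p in range(len(t)-2):
--         if ord(t[p]) == ord(t[p+1]) - 1 == ord(t[p+2]) - 2:
--             break
--     else:
--         return False
--     for p in range(len(t)-1):
--         if t[p] == t[p+1]:
--             for p2 in range(p+2, len(t)-1):
--                 if t[p]!=t[p2] and t[p2] == t[p2+1]:
--                     return True
--     return False
-- ===== SOURCE B (Python) =====
-- def check(t):
--     straight = any(ord(a) + 1 == ord(b) and ord(b) + 1 == ord(c)
--                    for (a, b), c in zip(zip(t, t[1:]), t[2:]))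
--     pairs = {a for a, b in zip(t, t[1:]) if a == b}
--     return straight and len(pairs) >= 2
-- ===== Notes on version B (the rewrite author's own statement) =====
-- stated objective: simpler
-- what changed: Index-free zip passes over adjacent windows replace A's index loops, and the nested O(n^2) second-pair scan is replaced by one linear pass collecting the set of distinct adjacent-pair letters and testing its size >= 2.
import Mathlib
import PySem

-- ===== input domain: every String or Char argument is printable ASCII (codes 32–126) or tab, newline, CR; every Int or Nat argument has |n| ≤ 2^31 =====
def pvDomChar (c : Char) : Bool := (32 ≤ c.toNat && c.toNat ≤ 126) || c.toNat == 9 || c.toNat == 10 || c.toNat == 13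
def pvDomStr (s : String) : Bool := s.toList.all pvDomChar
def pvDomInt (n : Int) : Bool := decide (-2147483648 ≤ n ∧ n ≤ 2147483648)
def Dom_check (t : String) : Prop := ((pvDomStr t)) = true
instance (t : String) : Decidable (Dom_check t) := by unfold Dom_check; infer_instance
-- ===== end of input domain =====

-- B drops A's index loops: zip passes over adjacent windows give the straight test
-- and the set of distinct adjacent-pair letters in one linear scan each; simpler.

-- ===== PORT A =====
-- A's nested loops with early 'return True'/'break' are transliterated as List.any
-- over the same ranges; t[p] is in range at every indexing site, so pyGetD is exact.
def check (t : String) : Bool :=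
  let cs := t.toList
  let n : Int := cs.length
  if (PySem.List.pyRange 0 (n - 2) 1).any (fun p =>
      ((PySem.List.pyGetD cs p ' ').toNat : Int) == ((PySem.List.pyGetD cs (p+1) ' ').toNat : Int) - 1
      && ((PySem.List.pyGetD cs (p+1) ' ').toNat : Int) - 1 == ((PySem.List.pyGetD cs (p+2) ' ').toNat : Int) - 2)
  then
    (PySem.List.pyRange 0 (n - 1) 1).any (fun p =>
      PySem.List.pyGetD cs p ' ' == PySem.List.pyGetD cs (p+1) ' '
      && (PySem.List.pyRange (p+2) (n - 1) 1).any (fun p2 =>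
          PySem.List.pyGetD cs p ' ' != PySem.List.pyGetD cs p2 ' '
          && PySem.List.pyGetD cs p2 ' ' == PySem.List.pyGetD cs (p2+1) ' '))
  else false

-- ===== PORT B =====
-- zip(t, t[1:]) / zip(zip(t, t[1:]), t[2:]) become List.zip with List.drop;
-- the set comprehension is PySem.Set.ofList of the filtered-mapped pair list.
def check_alt (t : String) : Bool :=
  let cs := t.toList
  let straight := ((cs.zip (cs.drop 1)).zip (cs.drop 2)).any
    (fun x => (x.1.1.toNat : Int) + 1 == (x.1.2.toNat : Int)
      && (x.1.2.toNat : Int) + 1 == (x.2.toNat : Int))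
  let pairs : PySem.Set Char := PySem.Set.ofList
    (((cs.zip (cs.drop 1)).filter (fun x => x.1 == x.2)).map (fun x => x.1))
  straight && decide (2 ≤ PySem.Set.len pairs)

-- ===== PRECONDITION & SPEC =====
def Spec_check (t : String) (out : Bool) : Prop := out = check_alt t
instance (t : String) (out : Bool) : Decidable (Spec_check t out) := by unfold Spec_check; infer_instance

-- ===== CLAIM (what is proved, stated in full; the proofs are below) =====
def Claim_equal_check : Prop := ∀ (t : String), Dom_check t → Spec_check t (check t)

-- ===== LEMMAS AND PROOFS =====

-- adjacent-pair zip as a range-indexed map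
theorem pv_zip2 (cs : List Char) (d : Char) :
    cs.zip (cs.drop 1)
      = (List.range (cs.length - 1)).map (fun i => (cs.getD i d, cs.getD (i+1) d)) := by
  apply List.ext_getElem
  · simp [List.length_zip]
  · intro i h1 h2
    simp only [List.length_zip, List.length_drop] at h1
    simp [List.getElem_zip, List.getD_eq_getElem?_getD,
      List.getElem?_eq_getElem (by omega : i < cs.length),
      List.getElem?_eq_getElem (by omega : i + 1 < cs.length)]

-- adjacent-triple zip as a range-indexed map
theorem pv_zip3 (cs : List Char) (d : Char) :
    (cs.zip (cs.drop 1)).zip (cs.drop 2)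
      = (List.range (cs.length - 2)).map
          (fun i => ((cs.getD i d, cs.getD (i+1) d), cs.getD (i+2) d)) := by
  apply List.ext_getElem
  · simp [List.length_zip]; omega
  · intro i h1 h2
    simp only [List.length_zip, List.length_drop, Nat.min_def] at h1
    split_ifs at h1 <;>
    simp [List.getElem_zip, List.getD_eq_getElem?_getD,
      List.getElem?_eq_getElem (by omega : i < cs.length),
      List.getElem?_eq_getElem (by omega : i + 1 < cs.length),
      List.getElem?_eq_getElem (by omega : i + 2 < cs.length),
      show 2 + i = i + 2 from Nat.add_comm 2 i]

-- pyGetD at small nonnegative offsets is getD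
theorem pv_g0 (cs : List Char) (j : Nat) :
    PySem.List.pyGetD cs (j : Int) ' ' = cs.getD j ' ' :=
  PySem.List.pyGetD_natCast cs j ' '

theorem pv_g1 (cs : List Char) (j : Nat) :
    PySem.List.pyGetD cs ((j : Int) + 1) ' ' = cs.getD (j+1) ' ' := by
  rw [show ((j : Int) + 1) = ((j + 1 : Nat) : Int) by push_cast; ring]
  exact PySem.List.pyGetD_natCast cs (j+1) ' '

theorem pv_g2 (cs : List Char) (j : Nat) :
    PySem.List.pyGetD cs ((j : Int) + 2) ' ' = cs.getD (j+2) ' ' := by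
  rw [show ((j : Int) + 2) = ((j + 2 : Nat) : Int) by push_cast; ring]
  exact PySem.List.pyGetD_natCast cs (j+2) ' '

-- a deduplicated set has ≥ 2 elements iff the source list holds two unequal elements
theorem pv_two_le_ofList {α : Type} [DecidableEq α] (xs : List α) :
    2 ≤ PySem.Set.len (PySem.Set.ofList xs) ↔ ∃ a ∈ xs, ∃ b ∈ xs, a ≠ b := by
  have hmem : ∀ x : α, x ∈ PySem.Set.ofList xs ↔ x ∈ xs := fun x => PySem.Set.mem_ofList xs x
  have hnd : (PySem.Set.ofList xs : List α).Nodup := PySem.Set.nodup_ofList xs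
  constructor
  · intro h
    rcases hS : (PySem.Set.ofList xs : List α) with _ | ⟨a, _ | ⟨b, l⟩⟩
    · rw [hS] at h; simp [PySem.Set.len] at h
    · rw [hS] at h; simp [PySem.Set.len] at h
    · rw [hS] at hnd hmem
      refine ⟨a, (hmem a).mp (by simp), b, (hmem b).mp (by simp), ?_⟩
      simp only [List.nodup_cons, List.mem_cons] at hnd
      exact fun hab => hnd.1 (Or.inl hab)
  · rintro ⟨a, ha, b, hb, hab⟩
    have ha' := (hmem a).mpr ha
    have hb' := (hmem b).mpr hb
    rcases hS : (PySem.Set.ofList xs : List α) with _ | ⟨c, _ | ⟨d, l⟩⟩ <;>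
      rw [hS] at ha' hb'
    · exact absurd ha' (List.not_mem_nil)
    · simp only [List.mem_singleton] at ha' hb'
      exact absurd (ha'.trans hb'.symm) hab
    · simp [PySem.Set.len]; omega

-- the straight checks agree: same windows, arithmetically equal tests
theorem pv_straight (cs : List Char) :
    ((PySem.List.pyRange 0 ((cs.length : Int) - 2) 1).any (fun p =>
      ((PySem.List.pyGetD cs p ' ').toNat : Int) == ((PySem.List.pyGetD cs (p+1) ' ').toNat : Int) - 1
      && ((PySem.List.pyGetD cs (p+1) ' ').toNat : Int) - 1 == ((PySem.List.pyGetD cs (p+2) ' ').toNat : Int) - 2))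
    = ((cs.zip (cs.drop 1)).zip (cs.drop 2)).any
        (fun x => (x.1.1.toNat : Int) + 1 == (x.1.2.toNat : Int)
          && (x.1.2.toNat : Int) + 1 == (x.2.toNat : Int)) := by
  rw [pv_zip3 cs ' ', Bool.eq_iff_iff]
  simp only [List.any_eq_true, List.mem_map, List.mem_range, PySem.List.mem_pyRange_one,
    Bool.and_eq_true, beq_iff_eq]
  constructor
  · rintro ⟨p, ⟨hp0, hp1⟩, h1, h2⟩
    obtain ⟨i, rfl⟩ : ∃ i : Nat, p = (i : Int) := ⟨p.toNat, by omega⟩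
    simp only [pv_g0, pv_g1, pv_g2] at h1 h2
    refine ⟨_, ⟨i, by omega, rfl⟩, ?_, ?_⟩ <;> dsimp only <;> omega
  · rintro ⟨x, ⟨i, hi, rfl⟩, h1, h2⟩
    simp only [] at h1 h2
    refine ⟨(i : Int), ⟨by omega, by omega⟩, ?_, ?_⟩ <;>
      · simp only [pv_g0, pv_g1, pv_g2]
        omega

-- the pair search: A's nested scan finds two different adjacent pairs iff there
-- are two distinct adjacent-pair letters (pure statement about g)
theorem pv_pairs (g : Int → Char) (n : Int) :
    (((PySem.List.pyRange 0 (n - 1) 1).any (fun p => (g p == g (p+1)) &&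
       (PySem.List.pyRange (p+2) (n - 1) 1).any (fun p2 =>
         (g p != g p2) && (g p2 == g (p2+1))))) = true)
    ↔ (∃ a, (∃ p : Int, 0 ≤ p ∧ p < n - 1 ∧ g p = g (p+1) ∧ g p = a) ∧
        ∃ b, (∃ q : Int, 0 ≤ q ∧ q < n - 1 ∧ g q = g (q+1) ∧ g q = b) ∧ a ≠ b) := by
  simp only [List.any_eq_true, PySem.List.mem_pyRange_one,
    Bool.and_eq_true, beq_iff_eq, bne_iff_ne, ne_eq]
  constructor
  · rintro ⟨p, ⟨hp0, hp1⟩, hpp, p2, ⟨hq0, hq1⟩, hne, hqq⟩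
    exact ⟨g p, ⟨p, hp0, hp1, hpp, rfl⟩, g p2, ⟨p2, by omega, hq1, hqq, rfl⟩, hne⟩
  · rintro ⟨a, ⟨i, hi0, hi1, hii, rfl⟩, b, ⟨j, hj0, hj1, hjj, rfl⟩, hab⟩
    rcases lt_trichotomy i j with hij | hij | hij
    · have hgap : i + 2 ≤ j := by
        by_contra hle
        have : j = i + 1 := by omega
        subst this; exact hab (hii.trans rfl)
      exact ⟨i, ⟨hi0, hi1⟩, hii, j, ⟨hgap, hj1⟩, hab, hjj⟩
    · exact absurd (hij ▸ rfl) hab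
    · have hgap : j + 2 ≤ i := by
        by_contra hle
        have : i = j + 1 := by omega
        subst this; exact hab (hjj.trans rfl).symm
      exact ⟨j, ⟨hj0, hj1⟩, hjj, i, ⟨hgap, hi1⟩, fun h => hab h.symm, hii⟩

-- membership in B's pair-letter source list, as an Int-indexed condition
theorem pv_pair_mem (cs : List Char) (x : Char) :
    (x ∈ ((cs.zip (cs.drop 1)).filter (fun y => y.1 == y.2)).map (fun y => y.1))
      ↔ ∃ p : Int, 0 ≤ p ∧ p < (cs.length : Int) - 1 ∧
          PySem.List.pyGetD cs p ' ' = PySem.List.pyGetD cs (p+1) ' ' ∧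
          PySem.List.pyGetD cs p ' ' = x := by
  rw [pv_zip2 cs ' ']
  simp only [List.mem_map, List.mem_filter, List.mem_range, beq_iff_eq]
  constructor
  · rintro ⟨y, ⟨⟨i, hi, rfl⟩, hy⟩, rfl⟩
    simp only [] at hy ⊢
    refine ⟨(i : Int), by omega, by omega, ?_, ?_⟩
    · simp only [pv_g0, pv_g1]; exact hy
    · simp only [pv_g0]
  · rintro ⟨p, hp0, hp1, hpp, rfl⟩
    obtain ⟨i, rfl⟩ : ∃ i : Nat, p = (i : Int) := ⟨p.toNat, by omega⟩
    simp only [pv_g0, pv_g1] at hpp ⊢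
    exact ⟨(cs.getD i ' ', cs.getD (i+1) ' '), ⟨⟨i, by omega, rfl⟩, hpp⟩, rfl⟩

theorem check_eq_alt (t : String) : check t = check_alt t := by
  simp only [check, check_alt]
  rw [pv_straight t.toList]
  cases hc : (((t.toList.zip (t.toList.drop 1)).zip (t.toList.drop 2)).any
      (fun x => (x.1.1.toNat : Int) + 1 == (x.1.2.toNat : Int)
        && (x.1.2.toNat : Int) + 1 == (x.2.toNat : Int))) with
  | false => simp
  | true =>
    simp only [if_true, Bool.true_and]
    rw [Bool.eq_iff_iff, decide_eq_true_iff,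
      pv_pairs (fun i => PySem.List.pyGetD t.toList i ' ') (t.toList.length : Int),
      pv_two_le_ofList]
    constructor
    · rintro ⟨a, ha, b, hb, hab⟩
      exact ⟨a, (pv_pair_mem _ _).mpr ha, b, (pv_pair_mem _ _).mpr hb, hab⟩
    · rintro ⟨a, ha, b, hb, hab⟩
      exact ⟨a, (pv_pair_mem _ _).mp ha, b, (pv_pair_mem _ _).mp hb, hab⟩

-- ===== VERDICT (by name: the statement is the Claim_ definition above) =====
theorem check_spec : Claim_equal_check := by
  intro t _
  unfold Spec_check
  exact check_eq_alt t
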